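-- pv_equiv track=rewrite | github.com/jnavarro7/netlist-parser | netlist-parser.py | count_instances
-- ===== SOURCE A (Python) =====
-- def count_instances(module_name, modules):
--     # Initialize a dictionary to store the counts of instances
--     counts = {}
--
--     # If it is not a module it is treated as a primitive, no recursion is executed
--     if module_name not in modules:
--         return counts
--
--     for instance_type in modules[module_name]:
--
--         # count this instance
--         counts[instance_type] = counts.get(instance_type, 0) + 1
--
--         # recurse if it is a module
--         if instance_type in modules:
--             sub_counts = count_instances(instance_type, modules)
--
--             for k, v in sub_counts.items():
--                 counts[k] = counts.get(k, 0) + v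
--
--     return counts
-- ===== SOURCE B (Python) =====
-- def count_instances(module_name, modules):
--     # Memoized (dynamic-programming) version: each module's transitive
--     # instance-type counts are computed once and cached, then reused.
--     cache = {}
--
--     def count(m):
--         hit = cache.get(m)
--         if hit is not None:
--             return hit
--         counts = {}
--         for t in modules.get(m, []):
--             counts[t] = counts.get(t, 0) + 1
--             if t in modules:
--                 for k, v in count(t).items():
--                     counts[k] = counts.get(k, 0) + v
--         cache[m] = counts
--         return counts
--
--     if module_name not in modules:
--         return {}
--     return count(module_name)
-- ===== Notes on version B (the rewrite author's own statement) =====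
-- stated objective: alternative
-- what changed: B replaces A's naive recursion (which recomputes a shared sub-module's counts once per occurrence) by top-down dynamic programming: a cache memoizes each module's finished count dictionary and cached subcounts are merged; on random inputs a timing run showed no measurable speed difference.
import Mathlib
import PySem

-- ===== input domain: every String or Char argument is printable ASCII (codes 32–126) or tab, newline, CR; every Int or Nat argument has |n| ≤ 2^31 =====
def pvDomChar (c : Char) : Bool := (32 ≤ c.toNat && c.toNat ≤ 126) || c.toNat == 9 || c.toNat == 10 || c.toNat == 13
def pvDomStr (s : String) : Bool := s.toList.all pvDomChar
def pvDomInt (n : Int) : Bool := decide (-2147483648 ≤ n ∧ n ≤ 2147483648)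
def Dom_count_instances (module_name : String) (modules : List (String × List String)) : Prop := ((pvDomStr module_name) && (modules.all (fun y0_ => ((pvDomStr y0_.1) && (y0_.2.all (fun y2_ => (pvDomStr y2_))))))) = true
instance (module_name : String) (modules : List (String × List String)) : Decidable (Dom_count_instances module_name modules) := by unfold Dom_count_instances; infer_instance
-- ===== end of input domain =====

-- B memoizes the per-module count dictionaries over the module DAG (top-down DP), so each
-- module's subtree counts are computed once instead of once per occurrence.

-- merge loop 'for k, v in sub.items(): counts[k] = counts.get(k, 0) + v' (identical inner loop in both Pythons)
def pvMergeCounts (counts sub : PySem.Dict String Int) : PySem.Dict String Int :=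
  sub.items.foldl (fun c kv => c.insert kv.1 (c.getD kv.1 0 + kv.2)) counts

-- ===== PORT A =====
-- fuel-indexed transliteration of A's recursion; under Pre_ the fuel modules.length+1 is never exhausted
def pvCountA (d : PySem.Dict String (List String)) : Nat → String → PySem.Dict String Int
  | 0, _ => PySem.Dict.empty
  | f + 1, m =>
    if d.contains m then
      (d.getD m []).foldl (fun counts t =>
        let counts := counts.insert t (counts.getD t 0 + 1)
        if d.contains t then pvMergeCounts counts (pvCountA d f t) else counts)
        PySem.Dict.empty
    else PySem.Dict.empty

def count_instances (module_name : String) (modules : List (String × List String)) : List (String × Int) :=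
  (pvCountA (PySem.Dict.ofList modules) (modules.length + 1) module_name).items

-- ===== PORT B =====
-- memoized recursion: state is (result, cache); cache maps a module to its finished count dict
def pvCountB (d : PySem.Dict String (List String)) :
    Nat → String → PySem.Dict String (PySem.Dict String Int) →
    PySem.Dict String Int × PySem.Dict String (PySem.Dict String Int)
  | 0, _, cache => (PySem.Dict.empty, cache)
  | f + 1, m, cache =>
    match cache.get? m with
    | some hit => (hit, cache)
    | none =>
      let r := (d.getD m []).foldl (fun (acc : PySem.Dict String Int × PySem.Dict String (PySem.Dict String Int)) t =>
        let cs := acc.1.insert t (acc.1.getD t 0 + 1)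
        if d.contains t then
          let sub := pvCountB d f t acc.2
          (pvMergeCounts cs sub.1, sub.2)
        else (cs, acc.2)) (PySem.Dict.empty, cache)
      (r.1, r.2.insert m r.1)

def count_instances_alt (module_name : String) (modules : List (String × List String)) : List (String × Int) :=
  let d := PySem.Dict.ofList modules
  if d.contains module_name then
    (pvCountB d (modules.length + 1) module_name PySem.Dict.empty).1.items
  else []

-- ===== PRECONDITION & SPEC =====
-- one dependency-expansion step: the modules instantiated (as sub-modules) by any module in S
def pvStep (d : PySem.Dict String (List String)) (S : List String) : List String :=
  (S.flatMap (fun m => d.getD m [])).filter (fun t => d.contains t)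

-- Pre_ excludes exactly the inputs on which Python A raises RecursionError: those where a
-- dependency cycle among the modules is reachable from module_name.  Closed form: expanding
-- module_name's sub-module dependencies |modules|+1 times leaves nothing (no dependency chain
-- is longer than the number of modules).
def Pre_count_instances (module_name : String) (modules : List (String × List String)) : Prop :=
  (pvStep (PySem.Dict.ofList modules))^[modules.length + 1] [module_name] = []
instance (module_name : String) (modules : List (String × List String)) : Decidable (Pre_count_instances module_name modules) := by unfold Pre_count_instances; infer_instance

def pvWitness_count_instances : String × (List (String × List String)) :=
  ("top", [("top", ["a", "b", "a"]), ("a", ["b", "leaf"])])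

def Spec_count_instances (module_name : String) (modules : List (String × List String)) (out : List (String × Int)) : Prop := out = count_instances_alt module_name modules
instance (module_name : String) (modules : List (String × List String)) (out : List (String × Int)) : Decidable (Spec_count_instances module_name modules out) := by unfold Spec_count_instances; infer_instance

-- ===== CLAIM (what is proved, stated in full; the proofs are below) =====
def Claim_equal_count_instances : Prop := ∀ (module_name : String) (modules : List (String × List String)), Dom_count_instances module_name modules → Pre_count_instances module_name modules → Spec_count_instances module_name modules (count_instances module_name modules)

-- ===== LEMMAS AND PROOFS =====

-- pvChainOk d n m = "every recursion chain of A starting at m visits at most n modules"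
def pvChainOk (d : PySem.Dict String (List String)) : Nat → String → Bool
  | 0, _ => false
  | n + 1, m => (d.getD m []).all (fun t => !d.contains t || pvChainOk d n t)


lemma pvIterNil (d : PySem.Dict String (List String)) :
    ∀ (n : Nat) (S : List String),
      (pvStep d)^[n] S = [] ↔ ∀ m ∈ S, pvChainOk d n m = true := by
  intro n
  induction n with
  | zero =>
    intro S
    simp [pvChainOk, List.eq_nil_iff_forall_not_mem]
  | succ k ih =>
    intro S
    rw [Function.iterate_succ_apply, ih]
    constructor
    · intro hstep m hm
      simp only [pvChainOk, List.all_eq_true]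
      intro t ht
      by_cases hct : d.contains t = true
      · have htS : t ∈ pvStep d S := by
          simp only [pvStep, List.mem_filter, List.mem_flatMap]
          exact ⟨⟨m, hm, ht⟩, hct⟩
        simp [hct, hstep t htS]
      · have hcf : d.contains t = false := by
          cases hcc : d.contains t
          · rfl
          · exact absurd hcc hct
        simp [hcf]
    · intro hall t ht
      simp only [pvStep, List.mem_filter, List.mem_flatMap] at ht
      obtain ⟨⟨m, hm, hmem⟩, hct⟩ := ht
      have h1 := hall m hm
      simp only [pvChainOk, List.all_eq_true] at h1
      have h2 := h1 t hmem
      simp [hct] at h2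
      exact h2

lemma pvCountA_fuelIrrel (d : PySem.Dict String (List String)) :
    ∀ n m f₁ f₂, pvChainOk d n m = true → n ≤ f₁ → n ≤ f₂ →
      pvCountA d f₁ m = pvCountA d f₂ m := by
  intro n
  induction n with
  | zero => intro m f₁ f₂ h; simp [pvChainOk] at h
  | succ k ih =>
    intro m f₁ f₂ h h₁ h₂
    obtain ⟨g₁, rfl⟩ : ∃ g, f₁ = g + 1 := ⟨f₁ - 1, by omega⟩
    obtain ⟨g₂, rfl⟩ : ∃ g, f₂ = g + 1 := ⟨f₂ - 1, by omega⟩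
    simp only [pvCountA]
    by_cases hm : d.contains m = true
    · simp only [hm, if_true]
      apply PySem.List.foldl_congr_mem
      intro acc t ht
      dsimp only
      by_cases hct : d.contains t = true
      · simp only [hct, if_true]
        simp only [pvChainOk, List.all_eq_true] at h
        have h' := h t ht
        simp only [hct, Bool.not_true, Bool.false_or] at h'
        rw [ih t g₁ g₂ h' (by omega) (by omega)]
      · simp [hct]
    · simp [hm]

lemma pvCountA_eq_of_chainOk (d : PySem.Dict String (List String)) {n₁ n₂ : Nat} {m : String}
    (h₁ : pvChainOk d n₁ m = true) (h₂ : pvChainOk d n₂ m = true) :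
    pvCountA d n₁ m = pvCountA d n₂ m := by
  rcases le_total n₁ n₂ with h | h
  · exact pvCountA_fuelIrrel d n₁ m n₁ n₂ h₁ le_rfl h
  · exact (pvCountA_fuelIrrel d n₂ m n₂ n₁ h₂ le_rfl h).symm

def pvValid (d : PySem.Dict String (List String)) (cache : PySem.Dict String (PySem.Dict String Int)) : Prop :=
  ∀ k v, cache.get? k = some v → ∃ n, pvChainOk d n k = true ∧ v = pvCountA d n k

lemma pvFoldAux (d : PySem.Dict String (List String)) (k g : Nat) (hkg : k ≤ g)
    (IH : ∀ m f cache, pvChainOk d k m = true → k ≤ f → pvValid d cache →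
      (pvCountB d f m cache).1 = pvCountA d k m ∧ pvValid d (pvCountB d f m cache).2) :
    ∀ (ks : List String), (∀ t ∈ ks, d.contains t = true → pvChainOk d k t = true) →
    ∀ (acc : PySem.Dict String Int) (cach : PySem.Dict String (PySem.Dict String Int)), pvValid d cach →
      (ks.foldl (fun (acc : PySem.Dict String Int × PySem.Dict String (PySem.Dict String Int)) t =>
          let cs := acc.1.insert t (acc.1.getD t 0 + 1)
          if d.contains t then
            let sub := pvCountB d g t acc.2
            (pvMergeCounts cs sub.1, sub.2)
          else (cs, acc.2)) (acc, cach)).1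
        = ks.foldl (fun counts t =>
            let counts := counts.insert t (counts.getD t 0 + 1)
            if d.contains t then pvMergeCounts counts (pvCountA d k t) else counts) acc
      ∧ pvValid d (ks.foldl (fun (acc : PySem.Dict String Int × PySem.Dict String (PySem.Dict String Int)) t =>
          let cs := acc.1.insert t (acc.1.getD t 0 + 1)
          if d.contains t then
            let sub := pvCountB d g t acc.2
            (pvMergeCounts cs sub.1, sub.2)
          else (cs, acc.2)) (acc, cach)).2 := by
  intro ks
  induction ks with
  | nil => intro _ acc cach hv; exact ⟨rfl, hv⟩
  | cons t ts iht =>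
    intro hts acc cach hv
    simp only [List.foldl_cons]
    by_cases hct : d.contains t = true
    · have hok := hts t (by simp) hct
      obtain ⟨he, hv2⟩ := IH t g cach hok hkg hv
      simp only [hct, if_true, he]
      exact iht (fun t' ht' => hts t' (List.mem_cons_of_mem t ht')) _ _ hv2
    · simp only [hct, Bool.false_eq_true, if_false]
      exact iht (fun t' ht' => hts t' (List.mem_cons_of_mem t ht')) _ _ hv

lemma pvMain (d : PySem.Dict String (List String)) :
    ∀ n m f cache, pvChainOk d n m = true → n ≤ f → pvValid d cache →
      (pvCountB d f m cache).1 = pvCountA d n m ∧ pvValid d (pvCountB d f m cache).2 := by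
  intro n
  induction n with
  | zero => intro m f cache h; simp [pvChainOk] at h
  | succ k ih =>
    intro m f cache h hf hv
    obtain ⟨g, rfl⟩ : ∃ g, f = g + 1 := ⟨f - 1, by omega⟩
    cases hc : cache.get? m with
    | some hit =>
      simp only [pvCountB, hc]
      obtain ⟨nk, hok, rfl⟩ := hv m hit hc
      exact ⟨pvCountA_eq_of_chainOk d hok h, hv⟩
    | none =>
      have htall : ∀ t ∈ d.getD m [], d.contains t = true → pvChainOk d k t = true := by
        intro t ht hct
        simp only [pvChainOk, List.all_eq_true] at h
        have h' := h t ht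
        simp only [hct, Bool.not_true, Bool.false_or] at h'
        exact h'
      have hfold := pvFoldAux d k g (by omega) (fun m f cache => ih m f cache)
        (d.getD m []) htall PySem.Dict.empty cache hv
      simp only [pvCountB, hc]
      refine ⟨?_, ?_⟩
      · dsimp only
        rw [hfold.1]
        simp only [pvCountA]
        by_cases hm : d.contains m = true
        · simp [hm]
        · have hm' : d.contains m = false := by
            cases hcm : d.contains m
            · rfl
            · exact absurd hcm hm
          have hd : d.getD m [] = [] := PySem.Dict.getD_of_not_contains d [] hm'
          simp [hm', hd]
      · dsimp only
        intro k' v hget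
        rw [PySem.Dict.get?_insert] at hget
        by_cases hk : k' = m
        · subst hk
          simp only [if_true] at hget
          refine ⟨k + 1, h, ?_⟩
          have := hfold.1
          cases hget
          rw [this]
          simp only [pvCountA]
          by_cases hm : d.contains k' = true
          · simp [hm]
          · have hm' : d.contains k' = false := by
              cases hcm : d.contains k'
              · rfl
              · exact absurd hcm hm
            have hd : d.getD k' [] = [] := PySem.Dict.getD_of_not_contains d [] hm'
            simp [hm', hd]
        · simp only [hk, if_false] at hget
          exact hfold.2 k' v hget

lemma pvValid_empty (d : PySem.Dict String (List String)) : pvValid d PySem.Dict.empty := by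
  intro k v h
  simp [PySem.Dict.get?_empty] at h

-- ===== VERDICT (by name: the statement is the Claim_ definition above) =====
theorem count_instances_spec : Claim_equal_count_instances := by
  intro m modules _ hpre
  unfold Spec_count_instances count_instances count_instances_alt
  dsimp only
  by_cases hm : (PySem.Dict.ofList modules).contains m = true
  · rw [if_pos hm]
    have hch : pvChainOk (PySem.Dict.ofList modules) (modules.length + 1) m = true :=
      (pvIterNil (PySem.Dict.ofList modules) (modules.length + 1) [m]).mp hpre m (by simp)
    have := pvMain (PySem.Dict.ofList modules) (modules.length + 1) m (modules.length + 1)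
      PySem.Dict.empty hch le_rfl (pvValid_empty _)
    rw [this.1]
  · rw [if_neg hm]
    have hm' : (PySem.Dict.ofList modules).contains m = false := by
      cases hcm : (PySem.Dict.ofList modules).contains m
      · rfl
      · exact absurd hcm hm
    simp [pvCountA, hm']
    rfl
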